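-- pv_equiv track=rewrite | github.com/ankit-sethi/expense_assit_ai | app/admin/manage_mappings.py | _suggest_pattern
-- ===== SOURCE A (Python) =====
-- def _suggest_pattern(raw_text: str, clean_label: str) -> str | None:
--     """
--     Given the user's clean label and the transaction's raw_text,
--     return the best substring pattern to use, or None if nothing found.
--     """
--     text_lower = raw_text.lower()
--     label_lower = clean_label.lower().strip()
--
--     # Full label appears verbatim
--     if label_lower in text_lower:
--         return label_lower
--
--     # Any individual word of the label (length > 3) appears in text
--     for word in sorted(label_lower.split(), key=len, reverse=True):
--         if len(word) > 3 and word in text_lower: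
--             return word
--
--     return None
-- ===== SOURCE B (Python) =====
-- def _suggest_pattern(raw_text: str, clean_label: str) -> str | None:
--     text_lower = raw_text.lower()
--     label_lower = clean_label.lower().strip()
--
--     # Full label appears verbatim
--     if label_lower in text_lower:
--         return label_lower
--
--     # Sort-free countdown search: find the longest word length, then try each
--     # candidate length from that maximum down to 4, scanning the words in
--     # original order; the first hit is the longest matching word (first of its
--     # length, matching A's stable-sort tie-break).
--     words = label_lower.split()
--     max_len = 0
--     for w in words:
--         if len(w) > max_len:
--             max_len = len(w)
--     for length in range(max_len, 3, -1):
--         for w in words: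
--             if len(w) == length and w in text_lower:
--                 return w
--     return None
-- ===== Notes on version B (the rewrite author's own statement) =====
-- stated objective: alternative
-- what changed: Replaces the sort-by-length-then-first-qualifying scan with a sort-free countdown search: one pass computes the maximum word length, then lengths are tried from that maximum down to 4, scanning the words in original order for one of exactly that length contained in the text.
import Mathlib
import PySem

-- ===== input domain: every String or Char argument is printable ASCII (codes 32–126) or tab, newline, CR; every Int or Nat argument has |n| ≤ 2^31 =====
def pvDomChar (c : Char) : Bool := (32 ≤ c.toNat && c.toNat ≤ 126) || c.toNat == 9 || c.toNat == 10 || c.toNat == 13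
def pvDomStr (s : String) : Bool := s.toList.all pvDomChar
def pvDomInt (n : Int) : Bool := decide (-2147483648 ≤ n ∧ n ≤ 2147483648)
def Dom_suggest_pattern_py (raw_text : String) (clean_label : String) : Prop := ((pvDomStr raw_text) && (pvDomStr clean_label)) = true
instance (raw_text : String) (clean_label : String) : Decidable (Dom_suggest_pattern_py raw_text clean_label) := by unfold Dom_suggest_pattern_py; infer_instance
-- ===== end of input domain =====

-- B replaces A's sort-by-length-then-scan with a sort-free countdown search:
-- one pass finds the maximum word length, then lengths are tried from that
-- maximum down to 4, scanning the words in original order (alternative, same cost class).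

-- ===== PORT A =====
-- the 'for word in sorted(...): if ...: return word' early-return loop
def pvLoopA (text_lower : String) : List String → Option String
  | [] => none
  | w :: ws =>
      if decide (3 < PySem.Str.len w) && PySem.Str.isIn w text_lower then some w
      else pvLoopA text_lower ws

def suggest_pattern_py (raw_text : String) (clean_label : String) : Option String :=
  let text_lower := PySem.Str.lower raw_text
  let label_lower := PySem.Str.strip (PySem.Str.lower clean_label)
  if PySem.Str.isIn label_lower text_lower then some label_lower
  else
    pvLoopA text_lower (PySem.List.sorted (PySem.Str.split₀ label_lower) PySem.Str.len true)

-- ===== PORT B =====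
-- inner 'for w in words: if len(w) == length and w in text_lower: return w'
def pvInnerB (text_lower : String) (length : Int) : List String → Option String
  | [] => none
  | w :: ws =>
      if (PySem.Str.len w == length) && PySem.Str.isIn w text_lower then some w
      else pvInnerB text_lower length ws

-- outer 'for length in range(max_len, 3, -1): …'
def pvOuterB (text_lower : String) (words : List String) : List Int → Option String
  | [] => none
  | L :: Ls =>
      match pvInnerB text_lower L words with
      | some w => some w
      | none => pvOuterB text_lower words Ls

def suggest_pattern_py_alt (raw_text : String) (clean_label : String) : Option String :=
  let text_lower := PySem.Str.lower raw_text
  let label_lower := PySem.Str.strip (PySem.Str.lower clean_label)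
  if PySem.Str.isIn label_lower text_lower then some label_lower
  else
    let words := PySem.Str.split₀ label_lower
    -- 'max_len = 0; for w in words: if len(w) > max_len: max_len = len(w)'
    let max_len := words.foldl (fun a w => if PySem.Str.len w > a then PySem.Str.len w else a) 0
    pvOuterB text_lower words (PySem.List.pyRange max_len 3 (-1))

-- ===== PRECONDITION & SPEC =====
def Spec_suggest_pattern_py (raw_text : String) (clean_label : String) (out : Option String) : Prop := out = suggest_pattern_py_alt raw_text clean_label
instance (raw_text : String) (clean_label : String) (out : Option String) : Decidable (Spec_suggest_pattern_py raw_text clean_label out) := by unfold Spec_suggest_pattern_py; infer_instance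

-- ===== CLAIM =====
def Claim_equal_suggest_pattern_py : Prop := ∀ (raw_text : String) (clean_label : String), Dom_suggest_pattern_py raw_text clean_label → Spec_suggest_pattern_py raw_text clean_label (suggest_pattern_py raw_text clean_label)

-- ===== LEMMAS AND PROOFS =====

-- A's early-return loop returns the head of the filtered list
theorem pvLoopA_eq_head_filter (text_lower : String) (ws : List String) :
    pvLoopA text_lower ws =
      (ws.filter (fun w => decide (3 < PySem.Str.len w) && PySem.Str.isIn w text_lower)).head? := by
  induction ws with
  | nil => rfl
  | cons w ws ih =>
      rw [List.filter_cons]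
      by_cases h : (decide (3 < PySem.Str.len w) && PySem.Str.isIn w text_lower) = true
      · rw [if_pos h, List.head?_cons]
        simp only [pvLoopA, h, if_true]
      · rw [if_neg h]
        simp only [pvLoopA, h, Bool.false_eq_true, if_false, ih]

-- inserting x when it goes before everything in l
theorem pv_insertBy_of_forall_before {α : Type} (b : α → α → Bool) (x : α) (l : List α)
    (h : ∀ z ∈ l, b x z = true) : PySem.List.insertBy b x l = x :: l := by
  cases l with
  | nil => rfl
  | cons y ys => simp [PySem.List.insertBy, h y (by simp)]

-- filter commutes with insertBy into a descending-sorted accumulator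
theorem pv_filter_insertBy {α : Type} (key : α → Int) (p : α → Bool) (x : α) (ys : List α)
    (hs : ys.Pairwise (fun a c => key c ≤ key a)) :
    (PySem.List.insertBy (fun a c => decide (key c < key a)) x ys).filter p =
      if p x then PySem.List.insertBy (fun a c => decide (key c < key a)) x (ys.filter p)
      else ys.filter p := by
  induction ys with
  | nil =>
      by_cases hx : p x = true <;> simp [PySem.List.insertBy, hx]
  | cons y ys ih =>
      rcases List.pairwise_cons.mp hs with ⟨hy, hys⟩
      by_cases hb : key y < key x
      · have hall : ∀ z ∈ y :: ys, (fun a c => decide (key c < key a)) x z = true := by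
          intro z hz
          rcases List.mem_cons.mp hz with h | h
          · simp [h, hb]
          · have := hy z h; simp; omega
        have hall' : ∀ z ∈ (y :: ys).filter p,
            (fun a c => decide (key c < key a)) x z = true := by
          intro z hz; exact hall z (List.mem_of_mem_filter hz)
        rw [show PySem.List.insertBy (fun a c => decide (key c < key a)) x (y :: ys)
              = x :: y :: ys from pv_insertBy_of_forall_before _ _ _ hall]
        by_cases hx : p x = true
        · rw [pv_insertBy_of_forall_before _ _ _ hall']
          simp [hx]
        · simp [List.filter_cons, hx]
      · have hstep : PySem.List.insertBy (fun a c => decide (key c < key a)) x (y :: ys)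
            = y :: PySem.List.insertBy (fun a c => decide (key c < key a)) x ys := by
          simp [PySem.List.insertBy, hb]
        rw [hstep]
        simp only [List.filter_cons, ih hys]
        by_cases hpy : p y = true
        · by_cases hx : p x = true
          · simp only [hpy, hx, if_true]
            simp [PySem.List.insertBy, hb]
          · simp [hpy, hx]
        · by_cases hx : p x = true <;> simp [hpy, hx]

-- filtering a stable descending sort = sorting the filtered list
theorem pv_filter_sorted (key : String → Int) (p : String → Bool) (xs : List String) :
    (PySem.List.sorted xs key true).filter p = PySem.List.sorted (xs.filter p) key true := by
  induction xs using List.reverseRecOn with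
  | nil => rfl
  | append_singleton xs x ih =>
      rw [PySem.List.sorted_rev_eq_foldl_insertBy, List.foldl_append,
        ← PySem.List.sorted_rev_eq_foldl_insertBy]
      simp only [List.foldl_cons, List.foldl_nil]
      rw [pv_filter_insertBy key p x _ (PySem.List.sorted_pairwise_rev xs key)]
      by_cases hx : p x = true
      · rw [if_pos hx, ih]
        have hfa : (xs ++ [x]).filter p = xs.filter p ++ [x] := by
          simp [List.filter_append, hx]
        rw [hfa, PySem.List.sorted_rev_eq_foldl_insertBy (xs.filter p ++ [x]),
          List.foldl_append, ← PySem.List.sorted_rev_eq_foldl_insertBy]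
        simp
      · rw [if_neg hx, ih]
        have hfa : (xs ++ [x]).filter p = xs.filter p := by
          simp [List.filter_append, hx]
        rw [hfa]

-- head of the stable descending sort = first element of maximal key (Python's max(…, key))
theorem pv_head_sorted_eq_max (key : String → Int) (ms : List String) :
    (PySem.List.sorted ms key true).head? = PySem.List.max? ms key := by
  induction ms using List.reverseRecOn with
  | nil => rfl
  | append_singleton ms x ih =>
      rw [PySem.List.sorted_rev_eq_foldl_insertBy, List.foldl_append,
        ← PySem.List.sorted_rev_eq_foldl_insertBy]
      simp only [List.foldl_cons, List.foldl_nil]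
      rw [PySem.List.max?, List.foldl_append]
      simp only [List.foldl_cons, List.foldl_nil]
      rw [← PySem.List.max?]
      rcases hs : PySem.List.sorted ms key true with _ | ⟨h, t⟩
      · have : ms = [] := (PySem.List.sorted_eq_nil_iff ms key true).mp hs
        subst this
        simp [PySem.List.max?, PySem.List.insertBy]
      · have hmax : PySem.List.max? ms key = some h := by rw [← ih, hs]; rfl
        rw [hmax]
        by_cases hb : key h < key x
        · rw [pv_insertBy_of_forall_before _ _ _ ?_]
          · simp [hb]
          · intro z hz
            have hzh : key z ≤ key h := by
              rcases List.mem_cons.mp hz with h1 | h1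
              · simp [h1]
              · have := List.pairwise_cons.mp (hs ▸ PySem.List.sorted_pairwise_rev ms key)
                exact this.1 z h1
            simp; omega
        · have : PySem.List.insertBy (fun a c => decide (key c < key a)) x (h :: t)
              = h :: PySem.List.insertBy (fun a c => decide (key c < key a)) x t := by
            simp [PySem.List.insertBy, hb]
          simp [this, hb]

-- ===== B-side lemmas =====

-- the inner scan is a find? over the words
theorem pvInnerB_eq_find (text_lower : String) (L : Int) (ws : List String) :
    pvInnerB text_lower L ws =
      ws.find? (fun w => (PySem.Str.len w == L) && PySem.Str.isIn w text_lower) := by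
  induction ws with
  | nil => rfl
  | cons w ws ih =>
      simp only [pvInnerB, ih]
      by_cases h : ((PySem.Str.len w == L) && PySem.Str.isIn w text_lower) = true
      · rw [if_pos h,
          List.find?_cons_of_pos (p := fun w => (PySem.Str.len w == L) && PySem.Str.isIn w text_lower) h]
      · rw [if_neg h,
          List.find?_cons_of_neg (p := fun w => (PySem.Str.len w == L) && PySem.Str.isIn w text_lower) h]

-- for a length L > 3, finding a word of length L contained in the text
-- = finding a word of length L among the qualifying (len>3 ∧ in-text) words
theorem pv_find_filter (text_lower : String) (L : Int) (hL : 3 < L) (ws : List String) :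
    ws.find? (fun w => (PySem.Str.len w == L) && PySem.Str.isIn w text_lower) =
      (ws.filter (fun w => decide (3 < PySem.Str.len w) && PySem.Str.isIn w text_lower)).find?
        (fun w => PySem.Str.len w == L) := by
  induction ws with
  | nil => rfl
  | cons w ws ih =>
      by_cases hq : ((PySem.Str.len w == L) && PySem.Str.isIn w text_lower) = true
      · have h1 : (PySem.Str.len w == L) = true := Bool.and_elim_left hq
        have h2 : PySem.Str.isIn w text_lower = true := Bool.and_elim_right hq
        have hlen : PySem.Str.len w = L := by simpa using h1
        have hp : (decide (3 < PySem.Str.len w) && PySem.Str.isIn w text_lower) = true := by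
          have : decide (3 < PySem.Str.len w) = true := by rw [hlen]; simpa using hL
          rw [this, h2]
          rfl
        rw [List.find?_cons_of_pos (p := fun w => (PySem.Str.len w == L) && PySem.Str.isIn w text_lower) hq,
          List.filter_cons, if_pos hp,
          List.find?_cons_of_pos (p := fun w => PySem.Str.len w == L) h1]
      · rw [List.find?_cons_of_neg (p := fun w => (PySem.Str.len w == L) && PySem.Str.isIn w text_lower) hq,
          ih, List.filter_cons]
        by_cases hp : (decide (3 < PySem.Str.len w) && PySem.Str.isIn w text_lower) = true
        · have hne : ¬ (PySem.Str.len w == L) = true := by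
            intro hl
            exact hq (by rw [hl, Bool.and_elim_right hp]; rfl)
          rw [if_pos hp, List.find?_cons_of_neg (p := fun w => PySem.Str.len w == L) hne]
        · rw [if_neg hp]

-- the accumulator step of Python's running max (max?'s fold function, named)
def pvMaxStep (k : String → Int) : Option String → String → Option String
  | none, x => some x
  | some m, x => if k m < k x then some x else some m

theorem pv_max?_eq_foldl_step (k : String → Int) (xs : List String) :
    PySem.List.max? xs k = xs.foldl (pvMaxStep k) none := by
  unfold PySem.List.max?
  apply PySem.List.foldl_congr_mem
  intro acc x _
  cases acc <;> rfl

-- the running-max fold stays put once every later key is no larger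
theorem pv_maxfold_stay (k : String → Int) (x : String) (ms : List String)
    (h : ∀ y ∈ ms, k y ≤ k x) :
    ms.foldl (pvMaxStep k) (some x) = some x := by
  induction ms with
  | nil => rfl
  | cons y ms ih =>
      have hy : ¬ k x < k y := by have := h y (by simp); omega
      rw [List.foldl_cons, show pvMaxStep k (some x) y = some x by simp [pvMaxStep, hy]]
      exact ih (fun z hz => h z (by simp [hz]))

-- the running max is the FIRST element attaining the (attained) bound L
theorem pv_maxfold_eq_find (k : String → Int) (L : Int) (ms : List String) :
    ∀ (acc : Option String) (m : String),
      ms.find? (fun y => k y == L) = some m →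
      (∀ y ∈ ms, k y ≤ L) →
      (∀ b, acc = some b → k b < L) →
      ms.foldl (pvMaxStep k) acc = some m := by
  induction ms with
  | nil => intro acc m hfind; simp at hfind
  | cons x ms ih =>
      intro acc m hfind hle hacc
      by_cases hx : (k x == L) = true
      · rw [List.find?_cons_of_pos (p := fun y => k y == L) hx] at hfind
        have hxm : x = m := Option.some.inj hfind
        subst hxm
        have hkx : k x = L := by simpa using hx
        rw [List.foldl_cons]
        have hstay := pv_maxfold_stay k x ms (by intro y hy; have := hle y (by simp [hy]); omega)
        cases acc with
        | none => exact hstay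
        | some b =>
            have := hacc b rfl
            have hlt : k b < k x := by omega
            rw [show pvMaxStep k (some b) x = some x by simp [pvMaxStep, hlt]]
            exact hstay
      · rw [List.find?_cons_of_neg (p := fun y => k y == L) hx] at hfind
        have hkx : k x < L := by
          have h1 := hle x (by simp)
          have h2 : k x ≠ L := by simpa using hx
          omega
        rw [List.foldl_cons]
        apply ih _ m hfind (fun y hy => hle y (by simp [hy]))
        intro b hb
        cases acc with
        | none =>
            rw [show pvMaxStep k none x = some x from rfl] at hb
            cases hb; omega
        | some c =>
            have hc := hacc c rfl
            rw [show pvMaxStep k (some c) x = if k c < k x then some x else some c from rfl] at hb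
            by_cases h2 : k c < k x
            · rw [if_pos h2] at hb; cases hb; omega
            · rw [if_neg h2] at hb; cases hb; omega

-- the countdown over a strictly-descending list of lengths > 3 covering every
-- qualifying word's length computes the first qualifying word of maximal length
theorem pv_outer_eq_max (text_lower : String) (ws : List String) (Ls : List Int)
    (hgt3 : ∀ L ∈ Ls, 3 < L)
    (hdesc : Ls.Pairwise (fun a b => b < a))
    (hcov : ∀ m ∈ ws.filter (fun w => decide (3 < PySem.Str.len w) && PySem.Str.isIn w text_lower),
        PySem.Str.len m ∈ Ls) :
    pvOuterB text_lower ws Ls =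
      PySem.List.max? (ws.filter (fun w => decide (3 < PySem.Str.len w) && PySem.Str.isIn w text_lower))
        PySem.Str.len := by
  induction Ls with
  | nil =>
      have hnil : ws.filter (fun w => decide (3 < PySem.Str.len w) && PySem.Str.isIn w text_lower) = [] := by
        rcases h : ws.filter (fun w => decide (3 < PySem.Str.len w) && PySem.Str.isIn w text_lower) with _ | ⟨m, ms⟩
        · rfl
        · exact absurd (hcov m (h.symm ▸ List.mem_cons_self)) (List.not_mem_nil)
      rw [hnil]
      rfl
  | cons L Ls ih =>
      rcases List.pairwise_cons.mp hdesc with ⟨hL, hdesc'⟩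
      have hL3 : 3 < L := hgt3 L (by simp)
      rw [pvOuterB, pvInnerB_eq_find, pv_find_filter text_lower L hL3]
      set ms := ws.filter (fun w => decide (3 < PySem.Str.len w) && PySem.Str.isIn w text_lower) with hms
      rcases hfind : ms.find? (fun w => PySem.Str.len w == L) with _ | m
      · -- no qualifying word of length L: every length lies in Ls, recurse
        show pvOuterB text_lower ws Ls = PySem.List.max? ms PySem.Str.len
        have hcov' : ∀ m ∈ ms, PySem.Str.len m ∈ Ls := by
          intro m hm
          have h1 := hcov m hm
          have hne : PySem.Str.len m ≠ L := by
            intro he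
            have := List.find?_eq_none.mp hfind m hm
            exact this (by simpa using he)
          rcases List.mem_cons.mp h1 with h | h
          · exact absurd h hne
          · exact h
        exact ih (fun x hx => hgt3 x (List.mem_cons_of_mem _ hx)) hdesc' hcov'
      · -- first qualifying word of length L: it is the first of maximal length
        show some m = PySem.List.max? ms PySem.Str.len
        have hle : ∀ y ∈ ms, PySem.Str.len y ≤ L := by
          intro y hy
          rcases List.mem_cons.mp (hcov y hy) with h | h
          · omega
          · have := hL _ h; omega
        rw [pv_max?_eq_foldl_step]
        exact (pv_maxfold_eq_find PySem.Str.len L ms none m hfind hle (fun b hb => by cases hb)).symm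

-- the literal running-max loop of Source B is the foldl of max
theorem pv_maxlen_eq_foldl_max (ws : List String) :
    ws.foldl (fun a w => if PySem.Str.len w > a then PySem.Str.len w else a) 0 =
      ws.foldl (fun a w => max a (PySem.Str.len w)) 0 := by
  apply PySem.List.foldl_congr_mem
  intro a w _
  simp only [gt_iff_lt, max_def]
  split_ifs <;> omega

-- ===== VERDICT =====
theorem suggest_pattern_py_spec : Claim_equal_suggest_pattern_py := by
  intro raw_text clean_label _
  unfold Spec_suggest_pattern_py
  show suggest_pattern_py raw_text clean_label = suggest_pattern_py_alt raw_text clean_label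
  rw [suggest_pattern_py, suggest_pattern_py_alt]
  set text_lower := PySem.Str.lower raw_text with htl
  set label_lower := PySem.Str.strip (PySem.Str.lower clean_label) with hll
  by_cases hverb : PySem.Str.isIn label_lower text_lower = true
  · rw [if_pos hverb, if_pos hverb]
  · rw [if_neg hverb, if_neg hverb]
    set ws := PySem.Str.split₀ label_lower with hws
    show pvLoopA text_lower (PySem.List.sorted ws PySem.Str.len true) =
      pvOuterB text_lower ws (PySem.List.pyRange
        (ws.foldl (fun a w => if PySem.Str.len w > a then PySem.Str.len w else a) 0) 3 (-1))
    rw [pvLoopA_eq_head_filter,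
      pv_filter_sorted PySem.Str.len (fun w => decide (3 < PySem.Str.len w) && PySem.Str.isIn w text_lower) ws,
      pv_head_sorted_eq_max]
    rw [pv_maxlen_eq_foldl_max]
    rw [pv_outer_eq_max]
    · intro L hL
      exact (PySem.List.mem_pyRange_neg_one.mp hL).1
    · rw [PySem.List.pyRange_neg_one]
      refine List.pairwise_map.mpr ?_
      refine List.Pairwise.imp ?_ (List.pairwise_lt_range)
      intro a b h; omega
    · intro m hm
      have hp := List.of_mem_filter hm
      have h3 : 3 < PySem.Str.len m := by
        simp only [Bool.and_eq_true, decide_eq_true_eq] at hp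
        exact hp.1
      have hmem := List.mem_of_mem_filter hm
      have hle := (PySem.List.le_foldl_max_int ws PySem.Str.len 0).2 m hmem
      exact PySem.List.mem_pyRange_neg_one.mpr ⟨h3, hle⟩
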